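-- pv_equiv track=rewrite | github.com/Lars-Janssen/Wikidata-Graph | graph.py | bnr
-- ===== SOURCE A (Python) =====
-- def bnr(q, e):
--     """
--         Perform a binary remove on an item from a list.
--     """
--     L = 0
--     R = len(q) - 1
--     m = (L+R)//2
--     while L <= R:
--         m = (L+R)//2
--
--         if q[m] < e:
--             L = m + 1
--         elif q[m] > e:
--             R = m - 1
--         elif q[m] == e:
--             del q[m]
--             return 0
--     return 1
-- ===== SOURCE B (Python) =====
-- def bnr(q, e):
--     """
--         Binary remove rewritten as divide-and-conquer on list slices:
--         search a copy by splitting it at its middle element, tracking the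
--         offset of the current slice so the found element can be deleted
--         from q in place (same index, same mutation as the original).
--     """
--     def go(xs, off):
--         if not xs:
--             return 1
--         m = (len(xs) - 1) // 2
--         v = xs[m]
--         if v == e:
--             del q[off + m]
--             return 0
--         if v < e:
--             return go(xs[m + 1:], off + m + 1)
--         return go(xs[:m], off)
--     return go(q[:], 0)
-- ===== Notes on version B (the rewrite author's own statement) =====
-- stated objective: alternative
-- what changed: The iterative two-pointer loop that narrows integer bounds [L,R] into a fixed list is replaced by a recursive divide-and-conquer that physically splits a copy of the list at its middle element (slices xs[m+1:], xs[:m]) while tracking an offset; both inspect the same elements in the same order, delete the same index and return the same 0/1.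
import Mathlib
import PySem

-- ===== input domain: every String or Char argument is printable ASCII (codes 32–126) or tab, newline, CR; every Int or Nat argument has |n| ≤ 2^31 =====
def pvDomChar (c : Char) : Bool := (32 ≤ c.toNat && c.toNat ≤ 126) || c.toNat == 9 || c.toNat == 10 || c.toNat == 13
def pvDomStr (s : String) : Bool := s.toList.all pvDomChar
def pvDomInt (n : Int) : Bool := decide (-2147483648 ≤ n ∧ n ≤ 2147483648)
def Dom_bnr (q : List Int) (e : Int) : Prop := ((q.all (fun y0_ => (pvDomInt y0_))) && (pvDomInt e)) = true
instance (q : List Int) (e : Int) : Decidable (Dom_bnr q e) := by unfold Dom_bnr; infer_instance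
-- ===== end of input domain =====

-- B replaces the iterative bounds-narrowing loop by divide-and-conquer on list slices
-- (split a copy at its middle element, track an offset); both Pythons delete the same
-- element of q in place — the equivalence proved here is about the RETURN value only.

-- ===== PORT A =====
-- the while loop: state (L, R); m recomputed each iteration; fuel only makes the
-- recursion structural (the interval shrinks each step, so fuel 0 is never reached from bnr)
def bnrLoopA (q : List Int) (e : Int) : Nat → Int → Int → Int
  | 0, _, _ => 1   -- fuel exhausted: unreachable from bnr's initial call
  | fuel + 1, L, R =>
    if L ≤ R then
      let m := PySem.Int.floordiv (L + R) 2
      match PySem.List.pyGet? q m with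
      | none => 1   -- IndexError in Python; unreachable from bnr's initial call (0 ≤ L ≤ m ≤ R < len q)
      | some v =>
        if v < e then bnrLoopA q e fuel (m + 1) R
        else if v > e then bnrLoopA q e fuel L (m - 1)
        else 0      -- the 'elif q[m] == e' branch, forced by trichotomy on Int: del q[m]; return 0
    else 1

def bnr (q : List Int) (e : Int) : Int := bnrLoopA q e (q.length + 1) 0 ((q.length : Int) - 1)

-- ===== PORT B =====
-- go(xs, off): divide and conquer on the slice xs itself; m = (len(xs)-1)//2 is a Nat
-- since len(xs) ≥ 1 past the emptiness test, so Nat division is exact here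
def bnrGo (e : Int) (xs : List Int) (off : Int) : Int :=
  if _hxs : xs = [] then 1
  else
    let m : Nat := (xs.length - 1) / 2
    match PySem.List.pyGet? xs (m : Int) with
    | none => 1   -- unreachable: m < len xs
    | some v =>
      if v = e then 0   -- del q[off + m]; return 0 (the deletion does not affect the return value)
      else if v < e then bnrGo e (PySem.List.slice xs (some ((m + 1 : Nat) : Int)) none) (off + (m : Int) + 1)
      else bnrGo e (PySem.List.slice xs none (some ((m : Nat) : Int))) off
termination_by xs.length
decreasing_by
  · rw [PySem.List.slice_from_natCast]
    have hne : xs.length ≠ 0 := fun h => _hxs (List.length_eq_zero_iff.mp h)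
    simp [List.length_drop]; omega
  · rw [PySem.List.slice_to_natCast]
    have hne : xs.length ≠ 0 := fun h => _hxs (List.length_eq_zero_iff.mp h)
    simp [List.length_take]; omega

-- go is called on a copy q[:] of q with offset 0
def bnr_alt (q : List Int) (e : Int) : Int := bnrGo e (PySem.List.slice q none none) 0

-- ===== PRECONDITION & SPEC =====
def Spec_bnr (q : List Int) (e : Int) (out : Int) : Prop := out = bnr_alt q e
instance (q : List Int) (e : Int) (out : Int) : Decidable (Spec_bnr q e out) := by unfold Spec_bnr; infer_instance

-- ===== CLAIM (what is proved, stated in full; the proofs are below) =====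
def Claim_equal_bnr : Prop := ∀ (q : List Int) (e : Int), Dom_bnr q e → Spec_bnr q e (bnr q e)

-- ===== LEMMAS AND PROOFS =====

-- the loop on the closed interval [L, R] of q equals go on the slice q[L : R+1]
theorem bnrLoopA_eq_bnrGo (q : List Int) (e : Int) :
    ∀ (fuel : Nat) (L R off : Int), 0 ≤ L → R < (q.length : Int) →
      R + 1 - L < (fuel : Int) →
      bnrLoopA q e fuel L R = bnrGo e ((q.drop L.toNat).take (R + 1 - L).toNat) off := by
  intro fuel
  induction fuel with
  | zero =>
    intro L R off _ _ hf
    have h0 : (R + 1 - L).toNat = 0 := by omega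
    rw [h0, List.take_zero, bnrGo]
    rfl
  | succ f ih =>
    intro L R off hL hR hf
    rw [bnrGo]
    by_cases h : L ≤ R
    · -- window nonempty
      have hlen : ((q.drop L.toNat).take (R + 1 - L).toNat).length = (R + 1 - L).toNat := by
        simp [List.length_take, List.length_drop]; omega
      have hne : (q.drop L.toNat).take (R + 1 - L).toNat ≠ [] := by
        intro hnil; rw [hnil] at hlen; simp at hlen; omega
      rw [dif_neg hne]
      set n : Nat := (R + 1 - L).toNat with hn
      set m' : Nat := (((q.drop L.toNat).take n).length - 1) / 2 with hm'
      have hm'n : m' = (n - 1) / 2 := by rw [hm', hlen]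
      clear_value m'
      clear_value n
      have hmA : PySem.Int.floordiv (L + R) 2 = L + (m' : Int) := by
        rw [PySem.Int.floordiv_eq_ediv_of_pos (by omega)]
        omega
      have hm'lt : m' < n := by omega
      -- the two lookups agree
      have hwin : ((q.drop L.toNat).take n)[m']? = q[L.toNat + m']? := by
        rw [List.getElem?_take_of_lt hm'lt, List.getElem?_drop]
      have hnI : ((n : Nat) : Int) = R + 1 - L := by omega
      have hidx : (L + (m' : Int)).toNat = L.toNat + m' := by omega
      have hinb : L.toNat + m' < q.length := by omega
      have hA : PySem.List.pyGet? q (L + (m' : Int)) = some q[L.toNat + m'] := by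
        rw [PySem.List.pyGet?_of_nonneg q (by omega), hidx, List.getElem?_eq_getElem hinb]
      have hB : PySem.List.pyGet? ((q.drop L.toNat).take n) ((m' : Nat) : Int)
          = some q[L.toNat + m'] := by
        rw [PySem.List.pyGet?_natCast, hwin, List.getElem?_eq_getElem hinb]
      show (if L ≤ R then _ else _) = _
      rw [if_pos h]
      simp only [hmA]
      rw [hA, hB]
      dsimp only
      set v := q[L.toNat + m'] with hv
      by_cases h1 : v < e
      · have hne1 : ¬ v = e := by omega
        rw [if_pos h1, if_neg hne1, if_pos h1]
        have hdrop : PySem.List.slice ((q.drop L.toNat).take n) (some ((m' + 1 : Nat) : Int)) none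
            = (q.drop (L + (m' : Int) + 1).toNat).take (R + 1 - (L + (m' : Int) + 1)).toNat := by
          rw [PySem.List.slice_from_natCast, List.drop_take, List.drop_drop]
          congr 1
          · omega
          · congr 1
            omega
        rw [hdrop]
        have hc1 : 0 ≤ L + (m' : Int) + 1 := by omega
        have hc2 : R + 1 - (L + (m' : Int) + 1) < (f : Int) := by omega
        exact ih (L + (m' : Int) + 1) R (off + (m' : Int) + 1) hc1 hR hc2
      · by_cases h2 : v > e
        · have hne1 : ¬ v = e := by omega
          rw [if_neg h1, if_pos h2, if_neg hne1, if_neg h1]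
          have htake : PySem.List.slice ((q.drop L.toNat).take n) none (some ((m' : Nat) : Int))
              = (q.drop L.toNat).take (L + (m' : Int) - 1 + 1 - L).toNat := by
            rw [PySem.List.slice_to_natCast, List.take_take]
            congr 1; omega
          rw [htake]
          have hc1 : L + (m' : Int) - 1 < (q.length : Int) := by omega
          have hc2 : L + (m' : Int) - 1 + 1 - L < (f : Int) := by omega
          exact ih L (L + (m' : Int) - 1) off hL hc1 hc2
        · have he : v = e := by omega
          rw [if_neg h1, if_neg h2, if_pos he]
    · have hwin0 : (R + 1 - L).toNat = 0 := by omega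
      rw [hwin0, List.take_zero]
      show (if L ≤ R then _ else _) = _
      rw [if_neg h]
      simp

-- ===== VERDICT (by name: the statement is the Claim_ definition above) =====
theorem bnr_spec : Claim_equal_bnr := by
  intro q e _
  unfold Spec_bnr bnr bnr_alt
  rw [PySem.List.slice_none_none]
  have h := bnrLoopA_eq_bnrGo q e (q.length + 1) 0 ((q.length : Int) - 1) 0
    (by omega) (by omega) (by push_cast; omega)
  simpa using h
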